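-- pv_equiv track=rewrite | github.com/Zzyta/DNN_weight_mantissa | profiling/test_mantissa.py | format_binary_preview
-- ===== SOURCE A (Python) =====
-- def format_binary_preview(binary_str, max_bits=320, groups_per_line=4):
--     truncated = binary_str[:max_bits]
--     groups = []
--
--     for i in range(0, len(truncated), 8):
--         group = truncated[i:i+8]
--         if len(group) < 8:
--             group += ' ' * (8 - len(group))
--         groups.append(group)
--
--     lines = []
--     for i in range(0, len(groups), groups_per_line):
--         line_groups = groups[i:i+groups_per_line]
--         lines.append(line_groups)
--
--     return lines
-- ===== SOURCE B (Python) =====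
-- def format_binary_preview(binary_str, max_bits=320, groups_per_line=4):
--     truncated = binary_str[:max_bits]
--     lines = []
--     for i in range(0, len(truncated), 8 * groups_per_line):
--         chunk = truncated[i:i + 8 * groups_per_line]
--         line = []
--         for j in range(0, len(chunk), 8):
--             line.append(chunk[j:j + 8].ljust(8))
--         lines.append(line)
--     return lines
-- ===== Notes on version B (the rewrite author's own statement) =====
-- stated objective: alternative
-- what changed: B drops A's intermediate full groups list and its second chunking pass: it traverses the truncated string once in line-sized slices, splitting each slice into space-padded 8-char groups directly with ljust.
import Mathlib
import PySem

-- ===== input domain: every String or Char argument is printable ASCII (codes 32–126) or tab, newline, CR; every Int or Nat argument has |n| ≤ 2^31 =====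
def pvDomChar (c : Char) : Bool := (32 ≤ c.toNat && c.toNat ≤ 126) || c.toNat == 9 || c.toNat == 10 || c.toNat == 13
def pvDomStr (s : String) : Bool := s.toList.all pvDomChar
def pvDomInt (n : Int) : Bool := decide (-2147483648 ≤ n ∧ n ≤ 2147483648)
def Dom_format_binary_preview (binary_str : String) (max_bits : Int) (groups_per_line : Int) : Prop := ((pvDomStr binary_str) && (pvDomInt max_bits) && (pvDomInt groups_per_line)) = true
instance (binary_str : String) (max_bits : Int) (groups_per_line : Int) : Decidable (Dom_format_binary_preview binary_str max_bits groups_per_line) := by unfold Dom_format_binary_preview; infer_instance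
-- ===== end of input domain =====

-- B builds each line directly from line-sized slices of the truncated string (one nested pass,
-- groups padded with ljust), instead of A's two sequential chunking passes through an
-- intermediate flat groups list; same cost, different decomposition.

-- ===== PORT A =====
-- group += ' ' * (8 - len(group))  (applied only when len(group) < 8, as in A)
def pvPadA (g : List Char) : List Char :=
  if PySem.Chars.len g < 8 then g ++ PySem.List.pyRepeat [' '] (8 - PySem.Chars.len g) else g

def format_binary_preview (binary_str : String) (max_bits : Int) (groups_per_line : Int) : List (List String) :=
  let truncated := PySem.List.slice binary_str.toList none (some max_bits)
  let groups := (PySem.List.pyRange 0 (PySem.Chars.len truncated) 8).foldl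
    (fun acc i => acc ++ [String.ofList (pvPadA (PySem.List.slice truncated (some i) (some (i + 8))))]) []
  (PySem.List.pyRange 0 (groups.length : Int) groups_per_line).foldl
    (fun acc i => acc ++ [PySem.List.slice groups (some i) (some (i + groups_per_line))]) []

-- ===== PORT B =====
-- chunk[j:j+8].ljust(8) : pad on the right with spaces to length 8
def pvLjust8 (g : List Char) : List Char := g ++ List.replicate (8 - g.length) ' '

def format_binary_preview_alt (binary_str : String) (max_bits : Int) (groups_per_line : Int) : List (List String) :=
  let truncated := PySem.List.slice binary_str.toList none (some max_bits)
  let w := 8 * groups_per_line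
  (PySem.List.pyRange 0 (PySem.Chars.len truncated) w).foldl
    (fun acc i =>
      let chunk := PySem.List.slice truncated (some i) (some (i + w))
      let line := (PySem.List.pyRange 0 (PySem.Chars.len chunk) 8).foldl
        (fun lacc j => lacc ++ [String.ofList (pvLjust8 (PySem.List.slice chunk (some j) (some (j + 8))))]) []
      acc ++ [line]) []

-- ===== PRECONDITION & SPEC =====
-- Pre_ excludes only groups_per_line = 0, on which Python's range(0, _, 0) raises ValueError in A (and in B).
def Pre_format_binary_preview (binary_str : String) (max_bits : Int) (groups_per_line : Int) : Prop :=
  groups_per_line ≠ 0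
instance (binary_str : String) (max_bits : Int) (groups_per_line : Int) : Decidable (Pre_format_binary_preview binary_str max_bits groups_per_line) := by unfold Pre_format_binary_preview; infer_instance

def pvWitness_format_binary_preview : String × Int × Int := ("101100111010", 10, 4)

def Spec_format_binary_preview (binary_str : String) (max_bits : Int) (groups_per_line : Int) (out : List (List String)) : Prop := out = format_binary_preview_alt binary_str max_bits groups_per_line
instance (binary_str : String) (max_bits : Int) (groups_per_line : Int) (out : List (List String)) : Decidable (Spec_format_binary_preview binary_str max_bits groups_per_line out) := by unfold Spec_format_binary_preview; infer_instance

-- ===== CLAIM (what is proved, stated in full; the proofs are below) =====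
def Claim_equal_format_binary_preview : Prop := ∀ (binary_str : String) (max_bits : Int) (groups_per_line : Int), Dom_format_binary_preview binary_str max_bits groups_per_line → Pre_format_binary_preview binary_str max_bits groups_per_line → Spec_format_binary_preview binary_str max_bits groups_per_line (format_binary_preview binary_str max_bits groups_per_line)

-- ===== LEMMAS AND PROOFS =====

-- splitting a list into consecutive pieces of size c (returns [] if c = 0; only used with 0 < c)
def pvChunks {α : Type} (c : Nat) : List α → List (List α)
  | [] => []
  | x :: t => if _h : c = 0 then [] else (x :: t).take c :: pvChunks c ((x :: t).drop c)
termination_by l => l.length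
decreasing_by simp; omega

theorem pvChunks_nil {α : Type} (c : Nat) : pvChunks (α := α) c [] = [] := by rw [pvChunks]

theorem pvChunks_of_ne_nil {α : Type} {c : Nat} (hc : 0 < c) {l : List α} (hl : l ≠ []) :
    pvChunks c l = l.take c :: pvChunks c (l.drop c) := by
  match l with
  | [] => exact absurd rfl hl
  | x :: t => rw [pvChunks]; simp [Nat.pos_iff_ne_zero.mp hc]

theorem take_pvChunks {α : Type} (c : Nat) (hc : 0 < c) (m : Nat) :
    ∀ l : List α, (pvChunks c l).take m = pvChunks c (l.take (c * m)) := by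
  induction m with
  | zero => intro l; simp [pvChunks_nil]
  | succ m ih =>
    intro l
    match l with
    | [] => simp [pvChunks_nil]
    | x :: t =>
      rw [pvChunks_of_ne_nil hc (by simp)]
      have hne : (x :: t).take (c * (m + 1)) ≠ [] := by
        simp [List.take_eq_nil_iff]; omega
      rw [pvChunks_of_ne_nil hc hne, List.take_succ_cons, ih, List.take_take, List.drop_take,
        Nat.mul_succ, Nat.add_sub_cancel]
      congr 2
      omega

theorem drop_pvChunks {α : Type} (c : Nat) (hc : 0 < c) (m : Nat) :
    ∀ l : List α, (pvChunks c l).drop m = pvChunks c (l.drop (c * m)) := by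
  induction m with
  | zero => intro l; simp
  | succ m ih =>
    intro l
    match l with
    | [] => simp [pvChunks_nil]
    | x :: t =>
      rw [pvChunks_of_ne_nil hc (by simp)]
      have h : (x :: t).drop (c * (m + 1)) = (((x :: t).drop c).drop (c * m)) := by
        rw [List.drop_drop]; ring_nf
      rw [h, List.drop_succ_cons, ih]

theorem pvChunks_map {α β : Type} (c : Nat) (hc : 0 < c) (F : α → β) :
    ∀ l : List α, pvChunks c (l.map F) = (pvChunks c l).map (List.map F) := by
  intro l
  induction hn : l.length using Nat.strong_induction_on generalizing l with
  | _ n ih =>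
    match l with
    | [] => simp [pvChunks_nil]
    | x :: t =>
      subst hn
      rw [List.map_cons, pvChunks_of_ne_nil hc (l := F x :: t.map F) (by simp),
        pvChunks_of_ne_nil hc (l := x :: t) (by simp), List.map_cons]
      congr 1
      · rw [← List.map_cons, List.map_take]
      · rw [← List.map_cons, ← List.map_drop]
        exact ih (((x :: t).drop c).length) (by simp; omega) _ rfl

theorem pvChunks_pvChunks {α : Type} (c g : Nat) (hc : 0 < c) (hg : 0 < g) :
    ∀ l : List α, pvChunks g (pvChunks c l) = (pvChunks (c * g) l).map (pvChunks c) := by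
  intro l
  induction hn : l.length using Nat.strong_induction_on generalizing l with
  | _ n ih =>
    match l with
    | [] => simp [pvChunks_nil]
    | x :: t =>
      subst hn
      have hcg : 0 < c * g := Nat.mul_pos hc hg
      rw [pvChunks_of_ne_nil hcg (by simp),
        pvChunks_of_ne_nil hg (l := pvChunks c (x :: t))
          (by rw [pvChunks_of_ne_nil hc (by simp)]; simp),
        take_pvChunks c hc, drop_pvChunks c hc, List.map_cons]
      congr 1
      exact ih (((x :: t).drop (c * g)).length) (by simp; omega) _ rfl

theorem range_map_pvChunks {α : Type} (c : Nat) (hc : 0 < c) :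
    ∀ l : List α, (List.range ((l.length + c - 1) / c)).map (fun k => (l.drop (c * k)).take c) = pvChunks c l := by
  intro l
  induction hn : l.length using Nat.strong_induction_on generalizing l with
  | _ n ih =>
    match l with
    | [] =>
      subst hn
      have h0 : (([] : List α).length + c - 1) / c = 0 := Nat.div_eq_of_lt (by simp; omega)
      simp only [h0, List.range_zero, List.map_nil, pvChunks_nil]
    | x :: t =>
      subst hn
      have hcnt : ((x :: t).length + c - 1) / c = (((x :: t).drop c).length + c - 1) / c + 1 := by
        rcases Nat.lt_or_ge t.length c with h | h
        · have h1 : ((x :: t).length + c - 1) / c = 1 := by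
            apply Nat.div_eq_of_lt_le <;> simp <;> omega
          have h2 : (((x :: t).drop c).length + c - 1) / c = 0 := by
            apply Nat.div_eq_of_lt; simp; omega
          omega
        · have e1 : (x :: t).length + c - 1 = (((x :: t).drop c).length + c - 1) + c := by
            simp; omega
          rw [e1, Nat.add_div_right _ hc]
      rw [hcnt, List.range_succ_eq_map, List.map_cons, List.map_map,
        pvChunks_of_ne_nil hc (by simp)]
      have ihd := ih (((x :: t).drop c).length) (by simp; omega) ((x :: t).drop c) rfl
      rw [← ihd]
      congr 1
      apply List.map_congr_left
      intro a _
      show ((x :: t).drop (c * (a + 1))).take c = _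
      rw [List.drop_drop]
      congr 2
      ring

theorem pyRange_neg_nil (n s : Int) (hn : 0 ≤ n) (hs : s < 0) :
    PySem.List.pyRange 0 n s = [] := by
  simp only [PySem.List.pyRange]
  rw [if_neg (by omega)]
  rw [if_neg (by omega), if_neg (by omega)]
  simp

theorem pyRange_map_slice {α β : Type} (c : Nat) (hc : 0 < c) (l : List α) (G : List α → β) :
    (PySem.List.pyRange 0 (l.length : Int) (c : Int)).map
        (fun i => G (PySem.List.slice l (some i) (some (i + (c : Int))))) =
      (pvChunks c l).map G := by
  rw [PySem.List.pyRange_of_pos 0 (l.length : Int) (by exact_mod_cast hc), List.map_map]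
  have hcount : (if (0:Int) < (l.length : Int) then (((l.length : Int) - 0 + (c:Int) - 1) / (c:Int)).toNat else 0) = (l.length + c - 1) / c := by
    rcases Nat.eq_zero_or_pos l.length with h | h
    · rw [if_neg (by simp [h])]
      rw [Nat.div_eq_of_lt (by omega)]
    · rw [if_pos (by exact_mod_cast h)]
      have e : ((l.length : Int) - 0 + (c:Int) - 1) = ((l.length + c - 1 : Nat) : Int) := by
        push_cast [Nat.cast_sub (by omega : 1 ≤ l.length + c)]; ring
      rw [e, ← Int.natCast_div]
      exact Int.toNat_natCast _
  rw [hcount, ← range_map_pvChunks c hc l, List.map_map]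
  apply List.map_congr_left
  intro k _
  show G (PySem.List.slice l (some (0 + (c:Int) * (k:Int))) (some (0 + (c:Int) * (k:Int) + (c:Int)))) = _
  have e1 : (0 + (c:Int) * (k:Int)) = ((c * k : Nat) : Int) := by push_cast; ring
  rw [e1, PySem.List.slice_natCast_add]
  rfl

theorem pvPadA_eq_pvLjust8 (g : List Char) : pvPadA g = pvLjust8 g := by
  unfold pvPadA pvLjust8
  rw [PySem.Chars.len_eq, PySem.List.pyRepeat_singleton]
  split_ifs with h
  · congr 2
    omega
  · have h0 : 8 - g.length = 0 := by omega
    simp [h0]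

theorem A_char (bs : String) (mb : Int) (gn : Nat) (hgn : 0 < gn) :
    format_binary_preview bs mb (gn : Int) =
      (pvChunks (8 * gn) (PySem.List.slice bs.toList none (some mb))).map
        (fun ch => (pvChunks 8 ch).map (fun gr => String.ofList (pvLjust8 gr))) := by
  unfold format_binary_preview
  simp only [PySem.Chars.len_eq, PySem.List.foldl_append_singleton_eq_map, List.nil_append]
  have h8 : ((8:Nat) : Int) = (8 : Int) := by norm_num
  rw [← h8,
    pyRange_map_slice 8 (by norm_num) (PySem.List.slice bs.toList none (some mb))
      (fun y => String.ofList (pvPadA y)),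
    pyRange_map_slice gn hgn
      ((pvChunks 8 (PySem.List.slice bs.toList none (some mb))).map
        (fun y => String.ofList (pvPadA y)))
      (fun y => y),
    pvChunks_map gn hgn, pvChunks_pvChunks 8 gn (by norm_num) hgn]
  rw [List.map_map, List.map_map]
  apply List.map_congr_left
  intro ch _
  show (pvChunks 8 ch).map (fun y => String.ofList (pvPadA y)) = _
  apply List.map_congr_left
  intro gr _
  rw [pvPadA_eq_pvLjust8]

theorem B_char (bs : String) (mb : Int) (gn : Nat) (hgn : 0 < gn) :
    format_binary_preview_alt bs mb (gn : Int) =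
      (pvChunks (8 * gn) (PySem.List.slice bs.toList none (some mb))).map
        (fun ch => (pvChunks 8 ch).map (fun gr => String.ofList (pvLjust8 gr))) := by
  unfold format_binary_preview_alt
  simp only [PySem.Chars.len_eq, PySem.List.foldl_append_singleton_eq_map, List.nil_append]
  have hw : ((8 * gn : Nat) : Int) = 8 * ((gn : Nat) : Int) := by push_cast; ring
  rw [← hw, pyRange_map_slice (8 * gn) (by omega) (PySem.List.slice bs.toList none (some mb))
      (fun ch => (PySem.List.pyRange 0 (ch.length : Int) 8).map
        (fun j => String.ofList (pvLjust8 (PySem.List.slice ch (some j) (some (j + 8))))))]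
  apply List.map_congr_left
  intro ch _
  have h8 : ((8:Nat) : Int) = (8 : Int) := by norm_num
  rw [← h8, pyRange_map_slice 8 (by norm_num) ch (fun y => String.ofList (pvLjust8 y))]

theorem A_eq_B (bs : String) (mb g : Int) (hg : g ≠ 0) :
    format_binary_preview bs mb g = format_binary_preview_alt bs mb g := by
  rcases lt_or_gt_of_ne hg with hneg | hpos
  · unfold format_binary_preview format_binary_preview_alt
    simp only [PySem.Chars.len_eq]
    rw [pyRange_neg_nil _ g (Nat.cast_nonneg _) hneg,
      pyRange_neg_nil _ (8 * g) (Nat.cast_nonneg _) (by omega)]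
    rfl
  · have hA := A_char bs mb g.toNat (by omega)
    have hB := B_char bs mb g.toNat (by omega)
    rw [Int.toNat_of_nonneg hpos.le] at hA hB
    rw [hA, hB]

-- ===== VERDICT (by name: the statement is the Claim_ definition above) =====
theorem format_binary_preview_spec : Claim_equal_format_binary_preview := by
  intro bs mb g _ hg
  unfold Spec_format_binary_preview
  exact A_eq_B bs mb g hg
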